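-- pv_equiv track=rewrite | github.com/charleschen-ml/pa-dllm | calculate_interpolations.py | calculate_interpolations
-- ===== SOURCE A (Python) =====
-- from typing import List, Dict
--
-- def calculate_interpolations(block_size: List[int]) -> List[Dict[int, int]]:
--     """
--     Generate interpolated manual_settings to cover intermediate positions.
--
--     Strategy: For each block in the greedy schedule, try all smaller values (1 to size-1),
--     keeping all previous blocks at their greedy values.
--
--     Args:
--         block_size: Original greedy schedule, e.g., [2, 3, 3]
--
--     Returns:
--         List of manual_settings dicts, where each dict maps block_index -> forced_size
--
--     Example:
--         >>> calculate_interpolations([2, 3, 3])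
--         [
--             {0: 1},              # Decrement first block to 1
--             {0: 2, 1: 1},        # Keep first, decrement second to 1
--             {0: 2, 1: 2},        # Keep first, decrement second to 2
--             {0: 2, 1: 3, 2: 1},  # Keep first two, decrement third to 1
--             {0: 2, 1: 3, 2: 2},  # Keep first two, decrement third to 2
--         ]
--
--         >>> calculate_interpolations([3, 5])
--         [
--             {0: 1},          # Decrement first block to 1
--             {0: 2},          # Decrement first block to 2
--             {0: 3, 1: 1},    # Keep first, decrement second to 1
--             {0: 3, 1: 2},    # Keep first, decrement second to 2
--             {0: 3, 1: 3},    # Keep first, decrement second to 3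
--             {0: 3, 1: 4},    # Keep first, decrement second to 4
--         ]
--
--     Note: Greedy baseline is NOT included, as it's already in the CSV.
--     """
--     interpolations = []
--
--     # NOTE: We skip the greedy baseline since it's already been generated
--
--     # 2. For each block, try all smaller values (1 to block_size-1)
--     for i, block_val in enumerate(block_size):
--         # Try decrementing this block to values 1, 2, ..., block_val-1
--         for new_val in range(1, block_val):
--             # Create manual_settings that keeps blocks 0 to i-1 and sets block i to new_val
--             manual_settings = {}
--
--             # Keep all previous blocks at their greedy values
--             for j in range(i):
--                 manual_settings[j] = block_size[j]
--
--             # Set current block to the decremented value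
--             manual_settings[i] = new_val
--
--             interpolations.append(manual_settings)
--
--     return interpolations
-- ===== SOURCE B (Python) =====
-- def calculate_interpolations(block_size):
--     interpolations = []
--     base = {}  # accumulated prefix: blocks 0..i-1 at their greedy values
--     for i, block_val in enumerate(block_size):
--         for new_val in range(1, block_val):
--             interpolations.append({**base, i: new_val})
--         base[i] = block_val
--     return interpolations
-- ===== Notes on version B (the rewrite author's own statement) =====
-- stated objective: simpler
-- what changed: B maintains one accumulated prefix dict across the outer loop (growing it by one entry per block) instead of rebuilding the whole prefix with an inner for j in range(i) loop for every emitted dict.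
import Mathlib
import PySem

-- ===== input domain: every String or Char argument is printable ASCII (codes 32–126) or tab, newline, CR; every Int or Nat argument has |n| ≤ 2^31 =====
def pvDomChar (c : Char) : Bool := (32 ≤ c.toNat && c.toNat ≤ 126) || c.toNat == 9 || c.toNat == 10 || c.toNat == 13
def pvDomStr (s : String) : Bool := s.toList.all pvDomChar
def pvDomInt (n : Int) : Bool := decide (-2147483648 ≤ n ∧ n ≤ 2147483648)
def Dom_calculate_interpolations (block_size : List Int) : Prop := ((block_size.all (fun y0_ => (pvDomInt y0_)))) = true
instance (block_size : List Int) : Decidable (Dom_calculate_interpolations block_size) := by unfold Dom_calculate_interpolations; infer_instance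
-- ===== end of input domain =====

-- B maintains one accumulated prefix dict across the outer loop instead of
-- rebuilding the prefix with an inner range(i) loop for every emitted dict (simpler).


-- ===== PORT A =====
-- block_size[j] is ported as pyGetD … 0: the loop only reads indices 0 ≤ j < i < len(block_size), where it is exact.
def calculate_interpolations (block_size : List Int) : List (List (Int × Int)) :=
  (PySem.List.enumerate block_size 0).foldl
    (fun interpolations iv =>
      (PySem.List.pyRange 1 iv.2 1).foldl
        (fun interpolations new_val =>
          let manual_settings : PySem.Dict Int Int :=
            (PySem.List.pyRange 0 iv.1 1).foldl
              (fun d j => d.insert j (PySem.List.pyGetD block_size j 0)) PySem.Dict.empty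
          interpolations ++ [(manual_settings.insert iv.1 new_val).items])
        interpolations)
    []

-- ===== PORT B =====
def calculate_interpolations_alt (block_size : List Int) : List (List (Int × Int)) :=
  ((PySem.List.enumerate block_size 0).foldl
    (fun (st : List (List (Int × Int)) × PySem.Dict Int Int) iv =>
      (st.1 ++ (PySem.List.pyRange 1 iv.2 1).map (fun new_val => (st.2.insert iv.1 new_val).items),
       st.2.insert iv.1 iv.2))
    ([], PySem.Dict.empty)).1

-- ===== PRECONDITION & SPEC =====
def Spec_calculate_interpolations (block_size : List Int) (out : List (List (Int × Int))) : Prop := out = calculate_interpolations_alt block_size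
instance (block_size : List Int) (out : List (List (Int × Int))) : Decidable (Spec_calculate_interpolations block_size out) := by unfold Spec_calculate_interpolations; infer_instance

-- ===== CLAIM (what is proved, stated in full; the proofs are below) =====
def Claim_equal_calculate_interpolations : Prop := ∀ (block_size : List Int), Dom_calculate_interpolations block_size → Spec_calculate_interpolations block_size (calculate_interpolations block_size)

-- ===== LEMMAS AND PROOFS =====

-- the prefix dict A rebuilds for block index i
def pvPrefix (bs : List Int) (i : Int) : PySem.Dict Int Int :=
  (PySem.List.pyRange 0 i 1).foldl
    (fun d j => d.insert j (PySem.List.pyGetD bs j 0)) PySem.Dict.empty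

def pvFoldA (bs : List Int) (l : List (Int × Int)) (acc : List (List (Int × Int))) : List (List (Int × Int)) :=
  l.foldl
    (fun interpolations iv =>
      (PySem.List.pyRange 1 iv.2 1).foldl
        (fun interpolations new_val =>
          interpolations ++ [((pvPrefix bs iv.1).insert iv.1 new_val).items])
        interpolations)
    acc

def pvFoldB (l : List (Int × Int)) (st : List (List (Int × Int)) × PySem.Dict Int Int) :
    List (List (Int × Int)) × PySem.Dict Int Int :=
  l.foldl
    (fun st iv =>
      (st.1 ++ (PySem.List.pyRange 1 iv.2 1).map (fun new_val => (st.2.insert iv.1 new_val).items),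
       st.2.insert iv.1 iv.2))
    st

theorem pvA_eq (bs : List Int) : calculate_interpolations bs = pvFoldA bs (PySem.List.enumerate bs 0) [] := rfl

theorem pvB_eq (bs : List Int) :
    calculate_interpolations_alt bs = (pvFoldB (PySem.List.enumerate bs 0) ([], PySem.Dict.empty)).1 := rfl

theorem pvPrefix_succ (bs : List Int) (i : Int) (hi : 0 ≤ i) :
    pvPrefix bs (i + 1) = (pvPrefix bs i).insert i (PySem.List.pyGetD bs i 0) := by
  unfold pvPrefix
  rw [PySem.List.pyRange_one_append 0 i (i + 1) hi (by omega), List.foldl_append,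
    PySem.List.pyRange_one_singleton]
  rfl

theorem pvInner (bs : List Int) (i x : Int) (acc : List (List (Int × Int))) :
    (PySem.List.pyRange 1 x 1).foldl
      (fun interpolations new_val =>
        interpolations ++ [((pvPrefix bs i).insert i new_val).items]) acc
    = acc ++ (PySem.List.pyRange 1 x 1).map
        (fun new_val => ((pvPrefix bs i).insert i new_val).items) := by
  induction (PySem.List.pyRange 1 x 1) generalizing acc with
  | nil => simp
  | cons y ys ih => simp [ih]

theorem pvLoop (bs : List Int) :
    ∀ (tail : List Int) (s : Int) (acc : List (List (Int × Int))),
      0 ≤ s → tail = bs.drop s.toNat →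
      pvFoldA bs (PySem.List.enumerate tail s) acc
        = (pvFoldB (PySem.List.enumerate tail s) (acc, pvPrefix bs s)).1 := by
  intro tail
  induction tail with
  | nil => intro s acc _ _; rfl
  | cons x rest ih =>
    intro s acc hs hdrop
    have hlen : s.toNat < bs.length := by
      by_contra h
      simp [List.drop_eq_nil_of_le (by omega : bs.length ≤ s.toNat)] at hdrop
    have hx : x = PySem.List.pyGetD bs s 0 := by
      have h1 : bs[s.toNat]? = some x := by
        have : (bs.drop s.toNat)[0]? = bs[s.toNat + 0]? := List.getElem?_drop
        rw [← hdrop] at this; simpa using this.symm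
      have hlt : s < (bs.length : Int) := by omega
      simp only [PySem.List.pyGetD, PySem.List.pyGet?, PySem.List.pyIdx?, if_pos hlt,
        if_pos hs, Option.bind_some, h1, Option.getD_some]
    have hrest : rest = bs.drop (s + 1).toNat := by
      have : bs.drop s.toNat = x :: rest := hdrop.symm
      have h2 := congrArg (List.drop 1) this
      rw [List.drop_drop] at h2
      have : s.toNat + 1 = (s + 1).toNat := by omega
      rw [this] at h2; exact h2.symm
    rw [PySem.List.enumerate_cons]
    show pvFoldA bs ((s, x) :: PySem.List.enumerate rest (s + 1)) acc = _
    unfold pvFoldA pvFoldB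
    simp only [List.foldl_cons]
    have hstep :
        (PySem.List.pyRange 1 x 1).foldl
          (fun interpolations new_val =>
            interpolations ++ [((pvPrefix bs s).insert s new_val).items]) acc
        = acc ++ (PySem.List.pyRange 1 x 1).map
            (fun new_val => ((pvPrefix bs s).insert s new_val).items) := pvInner bs s x acc
    rw [hstep]
    have := ih (s + 1)
      (acc ++ (PySem.List.pyRange 1 x 1).map
        (fun new_val => ((pvPrefix bs s).insert s new_val).items)) (by omega) hrest
    unfold pvFoldA pvFoldB at this
    rw [this, pvPrefix_succ bs s hs, ← hx]

-- ===== VERDICT (by name: the statement is the Claim_ definition above) =====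
theorem calculate_interpolations_spec : Claim_equal_calculate_interpolations := by
  intro bs _
  show calculate_interpolations bs = calculate_interpolations_alt bs
  rw [pvA_eq, pvB_eq]
  have h0 : pvPrefix bs 0 = PySem.Dict.empty := by
    unfold pvPrefix; rw [PySem.List.pyRange_one_eq_nil le_rfl]; rfl
  rw [← h0]
  exact pvLoop bs bs 0 [] le_rfl (by simp)
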